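-- pv_equiv track=rewrite | github.com/ShinUngJae/programmers | programmers/Python/level 1/이상한 문자 만들기.py | solution
-- ===== SOURCE A (Python) =====
-- def solution(s) :
--     answer = ''
--     letter = 0
--     for i in s :
--       if i.isalpha() :
--         if letter % 2 == 0 :
--           answer += i.upper()
--         else :
--           answer += i.lower()
--         letter += 1
--       else :
--         answer += ' '
--         letter = 0
--
--     return answer
-- ===== SOURCE B (Python) =====
-- def solution(s):
--     # Run-based decomposition: split s into maximal runs of alpha / non-alpha
--     # chars, then case each alpha run by its local enumerate parity and map
--     # non-alpha runs to spaces.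
--     parts = []
--     i = 0
--     n = len(s)
--     while i < n:
--         a = s[i].isalpha()
--         j = i
--         while j < n and s[j].isalpha() == a:
--             j += 1
--         if a:
--             parts.append(''.join(c.upper() if k % 2 == 0 else c.lower()
--                                  for k, c in enumerate(s[i:j])))
--         else:
--             parts.append(' ' * (j - i))
--         i = j
--     return ''.join(parts)
-- ===== Notes on version B (the rewrite author's own statement) =====
-- stated objective: idiomatic
-- what changed: B splits the string into maximal alpha/non-alpha runs and processes each run at once (enumerate parity for alpha runs, ' '*len for non-alpha runs), replacing A's flat character loop with its manual letter parity counter.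
import Mathlib
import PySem

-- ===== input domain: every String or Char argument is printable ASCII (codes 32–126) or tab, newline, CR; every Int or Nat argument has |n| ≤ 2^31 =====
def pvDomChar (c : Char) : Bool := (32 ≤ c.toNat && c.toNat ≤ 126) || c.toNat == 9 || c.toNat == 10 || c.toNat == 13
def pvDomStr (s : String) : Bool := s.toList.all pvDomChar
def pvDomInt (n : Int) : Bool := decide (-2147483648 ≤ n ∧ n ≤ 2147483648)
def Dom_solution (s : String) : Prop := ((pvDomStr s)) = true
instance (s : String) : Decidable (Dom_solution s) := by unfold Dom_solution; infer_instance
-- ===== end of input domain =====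

-- B replaces A's flat loop with a letter-parity counter by a run-grouping
-- decomposition (maximal alpha/non-alpha runs, enumerate parity per run); same value, same cost.

-- ===== PORT A =====
-- A's single pass: state (answer, letter); alpha chars get upper/lower by
-- letter parity, non-alpha chars become ' ' and reset letter to 0.
def solStepA (st : List Char × Int) (i : Char) : List Char × Int :=
  if PySem.Chars.isalpha i then
    (st.1 ++ [if st.2 % 2 == 0 then PySem.Chars.upperChar i else PySem.Chars.lowerChar i], st.2 + 1)
  else
    (st.1 ++ [' '], 0)

def solution (s : String) : String :=
  String.mk (s.toList.foldl solStepA ([], 0)).1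

-- ===== PORT B =====
-- the per-run comprehension: k even → upper, odd → lower
def procAlphaRun (r : List Char) : List Char :=
  (PySem.List.enumerate r).map
    (fun p => if p.1 % 2 == 0 then PySem.Chars.upperChar p.2 else PySem.Chars.lowerChar p.2)

-- run splitter: peel the maximal run agreeing with the head's isalpha flag
def groupsB : List Char → List Char
  | [] => []
  | c :: rest =>
    let a := PySem.Chars.isalpha c
    let p : Char → Bool := fun x => PySem.Chars.isalpha x == a
    let run := (c :: rest).takeWhile p
    let rest' := (c :: rest).dropWhile p
    (if a then procAlphaRun run else List.replicate run.length ' ') ++ groupsB rest'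
  termination_by l => l.length
  decreasing_by
    simp only [List.dropWhile_cons]
    simp only [beq_self_eq_true, if_true]
    exact Nat.lt_succ_of_le (List.length_dropWhile_le _ _)

def solution_alt (s : String) : String :=
  String.mk (groupsB s.toList)

-- ===== PRECONDITION & SPEC =====
def Spec_solution (s : String) (out : String) : Prop := out = solution_alt s
instance (s : String) (out : String) : Decidable (Spec_solution s out) := by unfold Spec_solution; infer_instance

-- ===== CLAIM (what is proved, stated in full; the proofs are below) =====
def Claim_equal_solution : Prop := ∀ (s : String), Dom_solution s → Spec_solution s (solution s)

-- ===== LEMMAS AND PROOFS =====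

-- A's answer built from an empty accumulator with counter k
def ansA (k : Int) (l : List Char) : List Char := (l.foldl solStepA ([], k)).1

theorem foldA_acc (l : List Char) : ∀ (acc : List Char) (k : Int),
    (l.foldl solStepA (acc, k)).1 = acc ++ ansA k l := by
  induction l with
  | nil => intro acc k; simp [ansA]
  | cons c t ih =>
    intro acc k
    simp only [ansA, List.foldl_cons, solStepA]
    by_cases h : PySem.Chars.isalpha c = true <;> simp [h, ih]

-- B's per-run transform, written with an explicit running index
def procFrom (k : Int) : List Char → List Char
  | [] => []
  | c :: cs =>
    (if k % 2 == 0 then PySem.Chars.upperChar c else PySem.Chars.lowerChar c) :: procFrom (k + 1) cs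

theorem procFrom_eq_enum (r : List Char) : ∀ (k : Int),
    procFrom k r = (PySem.List.enumerate r k).map
      (fun p => if p.1 % 2 == 0 then PySem.Chars.upperChar p.2 else PySem.Chars.lowerChar p.2) := by
  induction r with
  | nil => intro k; simp [procFrom, PySem.List.enumerate_nil]
  | cons c t ih => intro k; simp [procFrom, PySem.List.enumerate_cons, ih]

theorem ansA_alpha (r : List Char) : ∀ (t : List Char) (k : Int),
    (∀ x ∈ r, PySem.Chars.isalpha x = true) →
    ansA k (r ++ t) = procFrom k r ++ ansA (k + r.length) t := by
  induction r with
  | nil => intro t k _; simp [procFrom]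
  | cons c r' ih =>
    intro t k h
    have hc : PySem.Chars.isalpha c = true := h c (List.mem_cons_self ..)
    simp only [List.cons_append, ansA, List.foldl_cons, solStepA, hc, if_pos]
    rw [foldA_acc]
    rw [show ansA (k + 1) (r' ++ t) = procFrom (k + 1) r' ++ ansA (k + 1 + r'.length) t from
      ih t (k + 1) (fun x hx => h x (List.mem_cons_of_mem _ hx))]
    simp only [procFrom, List.nil_append, List.cons_append, List.length_cons]
    rw [show (k + 1 + (r'.length : Int)) = k + ((r'.length : Int) + 1) by ring]
    push_cast
    ring_nf
    rfl

theorem ansA_nonalpha (r : List Char) : ∀ (t : List Char) (k : Int), r ≠ [] →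
    (∀ x ∈ r, PySem.Chars.isalpha x = false) →
    ansA k (r ++ t) = List.replicate r.length ' ' ++ ansA 0 t := by
  induction r with
  | nil => intro t k h _; exact absurd rfl h
  | cons c r' ih =>
    intro t k _ h
    have hc : PySem.Chars.isalpha c = false := h c (List.mem_cons_self ..)
    simp only [List.cons_append, ansA, List.foldl_cons, solStepA, hc, Bool.false_eq_true,
      if_false]
    rw [foldA_acc]
    by_cases hr : r' = []
    · subst hr; rfl
    · rw [show ansA 0 (r' ++ t) = List.replicate r'.length ' ' ++ ansA 0 t from
        ih t 0 hr (fun x hx => h x (List.mem_cons_of_mem _ hx))]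
      simp [List.replicate_succ, ansA]

theorem ansA_reset (d : Char) (t : List Char) (k k' : Int)
    (h : PySem.Chars.isalpha d = false) : ansA k (d :: t) = ansA k' (d :: t) := by
  simp only [ansA, List.foldl_cons, solStepA, h, Bool.false_eq_true, if_false]

theorem dropWhile_head_false {p : Char → Bool} : ∀ (l : List Char) (d : Char) (t' : List Char),
    l.dropWhile p = d :: t' → p d = false := by
  intro l
  induction l with
  | nil => intro d t' h; simp [List.dropWhile] at h
  | cons c cs ih =>
    intro d t' h
    by_cases hc : p c = true
    · rw [List.dropWhile_cons_of_pos hc] at h; exact ih d t' h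
    · rw [List.dropWhile_cons_of_neg hc] at h
      cases h; simpa using hc

theorem main_eq : ∀ (n : Nat) (l : List Char), l.length ≤ n → ansA 0 l = groupsB l := by
  intro n
  induction n with
  | zero =>
    intro l hl
    rw [List.length_eq_zero_iff.mp (Nat.le_zero.mp hl), groupsB]; rfl
  | succ n ihn =>
    intro l hl
    match l with
    | [] => rw [groupsB]; rfl
    | c :: rest =>
      have hpc : (fun x => PySem.Chars.isalpha x == PySem.Chars.isalpha c) c = true := by simp
      have hsplit :
          (c :: rest).takeWhile (fun x => PySem.Chars.isalpha x == PySem.Chars.isalpha c) ++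
          (c :: rest).dropWhile (fun x => PySem.Chars.isalpha x == PySem.Chars.isalpha c) =
          c :: rest := List.takeWhile_append_dropWhile
      have hrun : (c :: rest).takeWhile (fun x => PySem.Chars.isalpha x == PySem.Chars.isalpha c) =
          c :: rest.takeWhile (fun x => PySem.Chars.isalpha x == PySem.Chars.isalpha c) :=
        List.takeWhile_cons_of_pos hpc
      have ht : (c :: rest).dropWhile (fun x => PySem.Chars.isalpha x == PySem.Chars.isalpha c) =
          rest.dropWhile (fun x => PySem.Chars.isalpha x == PySem.Chars.isalpha c) :=
        List.dropWhile_cons_of_pos hpc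
      have htlen :
          ((c :: rest).dropWhile (fun x => PySem.Chars.isalpha x == PySem.Chars.isalpha c)).length ≤ n := by
        rw [ht]
        exact le_trans (List.length_dropWhile_le _ _) (Nat.le_of_succ_le_succ hl)
      rw [groupsB]
      by_cases ha : PySem.Chars.isalpha c = true
      · have hreset : ∀ (k : Int),
            ansA k ((c :: rest).dropWhile (fun x => PySem.Chars.isalpha x == PySem.Chars.isalpha c)) =
            ansA 0 ((c :: rest).dropWhile (fun x => PySem.Chars.isalpha x == PySem.Chars.isalpha c)) := by
          intro k
          cases hcase : (c :: rest).dropWhile (fun x => PySem.Chars.isalpha x == PySem.Chars.isalpha c) with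
          | nil => rfl
          | cons d t' =>
            have hd := dropWhile_head_false _ d t' hcase
            have hdf : PySem.Chars.isalpha d = false := by
              rw [ha] at hd; simpa using hd
            exact ansA_reset d t' k 0 hdf
        have hall : ∀ x ∈ (c :: rest).takeWhile
            (fun x => PySem.Chars.isalpha x == PySem.Chars.isalpha c),
            PySem.Chars.isalpha x = true := by
          intro x hx
          have := List.mem_takeWhile_imp hx
          simp only [beq_iff_eq] at this
          rw [this, ha]
        conv_lhs => rw [← hsplit]
        rw [ansA_alpha _ _ _ hall, hreset, ihn _ htlen]
        simp only [ha, if_true, procAlphaRun, ← procFrom_eq_enum]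
      · have hall : ∀ x ∈ (c :: rest).takeWhile
            (fun x => PySem.Chars.isalpha x == PySem.Chars.isalpha c),
            PySem.Chars.isalpha x = false := by
          intro x hx
          have := List.mem_takeWhile_imp hx
          simp only [beq_iff_eq] at this
          rw [this]
          exact Bool.eq_false_iff.mpr ha
        have hne : (c :: rest).takeWhile
            (fun x => PySem.Chars.isalpha x == PySem.Chars.isalpha c) ≠ [] := by
          rw [hrun]; exact List.cons_ne_nil _ _
        conv_lhs => rw [← hsplit]
        rw [ansA_nonalpha _ _ _ hne hall, ihn _ htlen]
        simp [ha]

-- ===== VERDICT (by name: the statement is the Claim_ definition above) =====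
theorem solution_spec : Claim_equal_solution := by
  intro s _
  unfold Spec_solution solution solution_alt
  rw [show (s.toList.foldl solStepA ([], 0)).1 = ansA 0 s.toList from rfl,
      main_eq s.toList.length s.toList le_rfl]
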